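-- pv_equiv track=rewrite | github.com/Fondamenti18/fondamenti-di-programmazione | students/1806198/homework03/program01.py | getmax_bottomdx
-- ===== SOURCE A (Python) =====
-- def getmax_bottomdx(himg,img,col,colonna_flag,lmax):
--
--     q=0; max_q=0; y=0
--
--     for riga in range(himg-1,-1,-1):
--
--         if img[riga][col] > 0:colonna_flag[riga] = 0
--         else:colonna_flag[riga] += 1
--
--         if colonna_flag[riga] > lmax:
--             q += 1
--             if q > max_q:
--                 max_q = q;  y=riga
--         else: q = 0
--
--     return max_q,y,colonna_flag
-- ===== SOURCE B (Python) =====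
-- def getmax_bottomdx(himg, img, col, colonna_flag, lmax):
--     # pass 1: compute the fully-updated flag column (pure, forward comprehension)
--     n = max(himg, 0)
--     flags = [0 if img[r][col] > 0 else colonna_flag[r] + 1
--              for r in range(n)] + colonna_flag[n:]
--     # pass 2: bottom-up run-length scan over the finished column
--     q = 0; max_q = 0; y = 0
--     for riga in reversed(range(n)):
--         if flags[riga] > lmax:
--             q += 1
--             if q > max_q:
--                 max_q = q; y = riga
--         else:
--             q = 0
--     return max_q, y, flags
-- ===== Notes on version B (the rewrite author's own statement) =====
-- stated objective: alternative
-- what changed: A interleaves mutating the flag column and run-tracking in one bottom-up loop; B first builds the updated flag column as a pure forward comprehension (plus the untouched tail), then does an independent bottom-up run-length scan over the finished column; B also returns a fresh list instead of mutating colonna_flag in place (return value identical).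
import Mathlib
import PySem

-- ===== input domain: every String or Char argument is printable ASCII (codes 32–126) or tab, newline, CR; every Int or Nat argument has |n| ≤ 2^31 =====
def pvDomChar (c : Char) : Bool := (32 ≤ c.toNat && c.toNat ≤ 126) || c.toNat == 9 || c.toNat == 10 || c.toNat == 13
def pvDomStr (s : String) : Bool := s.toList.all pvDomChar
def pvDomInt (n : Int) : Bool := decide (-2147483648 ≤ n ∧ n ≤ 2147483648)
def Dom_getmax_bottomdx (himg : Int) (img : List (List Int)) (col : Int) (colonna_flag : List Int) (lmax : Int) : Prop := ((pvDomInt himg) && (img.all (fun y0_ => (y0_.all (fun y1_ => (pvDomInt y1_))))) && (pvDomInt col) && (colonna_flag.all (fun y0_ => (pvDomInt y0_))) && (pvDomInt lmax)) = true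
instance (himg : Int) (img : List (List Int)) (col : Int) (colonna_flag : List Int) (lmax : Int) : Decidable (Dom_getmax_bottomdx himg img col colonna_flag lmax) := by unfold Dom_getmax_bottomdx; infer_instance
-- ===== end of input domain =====

-- B replaces A's single interleaved mutate-and-scan loop with a pure forward comprehension that
-- builds the updated flag column, followed by an independent bottom-up run-length scan
-- (objective: alternative decomposition). Equivalence is about the RETURN value only:
-- Python A mutates colonna_flag in place, B returns a fresh list.

-- ===== PORT A =====
-- one iteration of A's loop; state = (q, max_q, y, colonna_flag)
def pvAStep (img : List (List Int)) (col lmax : Int)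
    (st : Int × Int × Int × List Int) (riga : Int) : Int × Int × Int × List Int :=
  let cf := st.2.2.2
  let cf' := if PySem.List.pyGetD ((PySem.List.pyGet? img riga).getD []) col 0 > 0
             then PySem.List.pySetD cf riga 0
             else PySem.List.pySetD cf riga (PySem.List.pyGetD cf riga 0 + 1)
  if PySem.List.pyGetD cf' riga 0 > lmax then
    if st.1 + 1 > st.2.1 then (st.1 + 1, st.1 + 1, riga, cf')
    else (st.1 + 1, st.2.1, st.2.2.1, cf')
  else (0, st.2.1, st.2.2.1, cf')

def getmax_bottomdx (himg : Int) (img : List (List Int)) (col : Int) (colonna_flag : List Int) (lmax : Int) : Int × Int × List Int :=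
  let st := (PySem.List.pyRange (himg - 1) (-1) (-1)).foldl (pvAStep img col lmax) (0, 0, 0, colonna_flag)
  (st.2.1, st.2.2.1, st.2.2.2)

-- ===== PORT B =====
-- pass 1 of Source B: the fully-updated flag column (comprehension ++ untouched tail)
def pvBFlags (himg : Int) (img : List (List Int)) (col : Int) (colonna_flag : List Int) : List Int :=
  (PySem.List.pyRange 0 (max himg 0) 1).map (fun r =>
      if PySem.List.pyGetD ((PySem.List.pyGet? img r).getD []) col 0 > 0 then 0
      else PySem.List.pyGetD colonna_flag r 0 + 1)
    ++ PySem.List.slice colonna_flag (some (max himg 0)) none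

-- one iteration of Source B's scan; state = (q, max_q, y)
def pvBStep (lmax : Int) (flags : List Int) (st : Int × Int × Int) (riga : Int) : Int × Int × Int :=
  if PySem.List.pyGetD flags riga 0 > lmax then
    if st.1 + 1 > st.2.1 then (st.1 + 1, st.1 + 1, riga)
    else (st.1 + 1, st.2.1, st.2.2)
  else (0, st.2.1, st.2.2)

def getmax_bottomdx_alt (himg : Int) (img : List (List Int)) (col : Int) (colonna_flag : List Int) (lmax : Int) : Int × Int × List Int :=
  let flags := pvBFlags himg img col colonna_flag
  let st := ((PySem.List.pyRange 0 (max himg 0) 1).reverse).foldl (pvBStep lmax flags) (0, 0, 0)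
  (st.2.1, st.2.2, flags)

-- ===== PRECONDITION & SPEC =====
-- Pre_: exactly the inputs where Python A returns (no IndexError): every visited row index
-- exists in img and colonna_flag, and col is a valid (possibly negative) index of each visited row.
def Pre_getmax_bottomdx (himg : Int) (img : List (List Int)) (col : Int) (colonna_flag : List Int) (lmax : Int) : Prop :=
  himg.toNat ≤ img.length ∧ himg.toNat ≤ colonna_flag.length ∧
    ∀ row ∈ img.take himg.toNat, PySem.Raise.InRange row.length col
instance (himg : Int) (img : List (List Int)) (col : Int) (colonna_flag : List Int) (lmax : Int) : Decidable (Pre_getmax_bottomdx himg img col colonna_flag lmax) := by unfold Pre_getmax_bottomdx; infer_instance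

def pvWitness_getmax_bottomdx : Int × List (List Int) × Int × List Int × Int := (2, [[0], [1]], 0, [3, 0], 1)

def Spec_getmax_bottomdx (himg : Int) (img : List (List Int)) (col : Int) (colonna_flag : List Int) (lmax : Int) (out : Int × Int × List Int) : Prop := out = getmax_bottomdx_alt himg img col colonna_flag lmax
instance (himg : Int) (img : List (List Int)) (col : Int) (colonna_flag : List Int) (lmax : Int) (out : Int × Int × List Int) : Decidable (Spec_getmax_bottomdx himg img col colonna_flag lmax out) := by unfold Spec_getmax_bottomdx; infer_instance

-- ===== CLAIM (what is proved, stated in full; the proofs are below) =====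
def Claim_equal_getmax_bottomdx : Prop := ∀ (himg : Int) (img : List (List Int)) (col : Int) (colonna_flag : List Int) (lmax : Int), Dom_getmax_bottomdx himg img col colonna_flag lmax → Pre_getmax_bottomdx himg img col colonna_flag lmax → Spec_getmax_bottomdx himg img col colonna_flag lmax (getmax_bottomdx himg img col colonna_flag lmax)

-- ===== LEMMAS AND PROOFS =====

-- the value A writes into (and B computes for) row r, from the ORIGINAL column
def pvF (img : List (List Int)) (col : Int) (colonna_flag : List Int) (r : Int) : Int :=
  if PySem.List.pyGetD ((PySem.List.pyGet? img r).getD []) col 0 > 0 then 0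
  else PySem.List.pyGetD colonna_flag r 0 + 1

lemma pvGetSet (xs : List Int) (i j v : Int) (hi0 : 0 ≤ i) (_hil : i < (xs.length : Int))
    (hj0 : 0 ≤ j) (hjl : j < (xs.length : Int)) :
    PySem.List.pyGetD (PySem.List.pySetD xs i v) j 0 = if j = i then v else PySem.List.pyGetD xs j 0 := by
  rw [PySem.List.pySetD_of_nonneg _ _ hi0,
      PySem.List.pyGetD_eq_getElem _ _ hj0 (by simpa using hjl),
      PySem.List.pyGetD_eq_getElem _ _ hj0 (by simpa using hjl)]
  rw [List.getElem_set]
  by_cases h : j = i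
  · simp [h]
  · have : i.toNat ≠ j.toNat := by omega
    simp [this, h]

lemma pvMain (img : List (List Int)) (col lmax : Int) (colonna_flag : List Int) (F : List Int) :
    ∀ (rs : List Int) (q mq y : Int) (cf : List Int),
    cf.length = colonna_flag.length →
    rs.Nodup →
    (∀ r ∈ rs, 0 ≤ r ∧ r < (cf.length : Int)) →
    (∀ r ∈ rs, PySem.List.pyGetD cf r 0 = PySem.List.pyGetD colonna_flag r 0) →
    (∀ r ∈ rs, PySem.List.pyGetD F r 0 = pvF img col colonna_flag r) →
    rs.foldl (pvAStep img col lmax) (q, mq, y, cf)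
      = (let s := rs.foldl (pvBStep lmax F) (q, mq, y)
         (s.1, s.2.1, s.2.2,
          rs.foldl (fun c r => PySem.List.pySetD c r (pvF img col colonna_flag r)) cf)) := by
  intro rs
  induction rs with
  | nil => intros; simp
  | cons riga rs ih =>
    intro q mq y cf hlen hnd hbnd hagree hF
    have hr := hbnd riga (by simp)
    have hcf' : (if PySem.List.pyGetD ((PySem.List.pyGet? img riga).getD []) col 0 > 0
                 then PySem.List.pySetD cf riga 0
                 else PySem.List.pySetD cf riga (PySem.List.pyGetD cf riga 0 + 1))
               = PySem.List.pySetD cf riga (pvF img col colonna_flag riga) := by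
      unfold pvF
      rw [hagree riga (by simp)]
      split <;> rfl
    have hread : PySem.List.pyGetD (PySem.List.pySetD cf riga (pvF img col colonna_flag riga)) riga 0
               = pvF img col colonna_flag riga := by
      rw [pvGetSet cf riga riga _ hr.1 hr.2 hr.1 hr.2]; simp
    have hFr : PySem.List.pyGetD F riga 0 = pvF img col colonna_flag riga := hF riga (by simp)
    have hnotmem : riga ∉ rs := by simpa using (List.nodup_cons.mp hnd).1
    -- facts for the tail, with cf updated at riga
    have hlen' : (PySem.List.pySetD cf riga (pvF img col colonna_flag riga)).length = colonna_flag.length := by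
      rw [PySem.List.pySetD_of_nonneg _ _ hr.1]; simpa using hlen
    have hbnd' : ∀ r ∈ rs, 0 ≤ r ∧ r < ((PySem.List.pySetD cf riga (pvF img col colonna_flag riga)).length : Int) := by
      intro r hm
      have := hbnd r (by simp [hm])
      constructor
      · exact this.1
      · rw [PySem.List.pySetD_of_nonneg _ _ hr.1]; simpa using this.2
    have hagree' : ∀ r ∈ rs, PySem.List.pyGetD (PySem.List.pySetD cf riga (pvF img col colonna_flag riga)) r 0
                 = PySem.List.pyGetD colonna_flag r 0 := by
      intro r hm
      have hb := hbnd r (by simp [hm])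
      rw [pvGetSet cf riga r _ hr.1 hr.2 hb.1 hb.2]
      have : r ≠ riga := fun h => hnotmem (h ▸ hm)
      rw [if_neg this]
      exact hagree r (by simp [hm])
    have hF' : ∀ r ∈ rs, PySem.List.pyGetD F r 0 = pvF img col colonna_flag r := by
      intro r hm; exact hF r (by simp [hm])
    have hnd' : rs.Nodup := (List.nodup_cons.mp hnd).2
    simp only [List.foldl_cons]
    -- evaluate one A-step and one B-step
    show List.foldl (pvAStep img col lmax) (pvAStep img col lmax (q, mq, y, cf) riga) rs = _
    rw [show pvAStep img col lmax (q, mq, y, cf) riga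
        = (let s := pvBStep lmax F (q, mq, y) riga
           (s.1, s.2.1, s.2.2, PySem.List.pySetD cf riga (pvF img col colonna_flag riga))) from by
      unfold pvAStep pvBStep
      simp only [hcf', hread, hFr]
      split <;> [skip; rfl]
      split <;> rfl]
    simp only [pvBStep]
    split
    · split
      · exact ih (q+1) (q+1) riga _ hlen' hnd' hbnd' hagree' hF'
      · exact ih (q+1) mq y _ hlen' hnd' hbnd' hagree' hF'
    · exact ih 0 mq y _ hlen' hnd' hbnd' hagree' hF'

-- the iterated pySetD applied to every row of rs, characterised pointwise
lemma pvUpdGet (img : List (List Int)) (col : Int) (colonna_flag : List Int) :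
    ∀ (rs : List Int) (cf : List Int) (j : Nat), j < cf.length →
    (∀ r ∈ rs, 0 ≤ r) →
    (rs.foldl (fun c r => PySem.List.pySetD c r (pvF img col colonna_flag r)) cf)[j]? =
      if (j : Int) ∈ rs then some (pvF img col colonna_flag j) else cf[j]? := by
  intro rs
  induction rs with
  | nil => intros; simp
  | cons riga rs ih =>
    intro cf j hj hpos
    have hr0 : 0 ≤ riga := hpos riga (by simp)
    simp only [List.foldl_cons]
    rw [PySem.List.pySetD_of_nonneg _ _ hr0]
    have hlen : (cf.set riga.toNat (pvF img col colonna_flag riga)).length = cf.length := by simp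
    rw [ih _ j (by omega) (fun r hm => hpos r (by simp [hm]))]
    by_cases hmem : (j : Int) ∈ rs
    · simp [hmem]
    · rw [if_neg hmem]
      by_cases hje : (j : Int) = riga
      · have : riga.toNat = j := by omega
        subst this
        simp [hje, hj]
      · have h2 : riga.toNat ≠ j := by omega
        simp [List.getElem?_set_ne h2, hje, hmem]

lemma pvLenUpd (img : List (List Int)) (col : Int) (colonna_flag : List Int) :
    ∀ (rs : List Int) (cf : List Int),
    (rs.foldl (fun c r => PySem.List.pySetD c r (pvF img col colonna_flag r)) cf).length = cf.length := by
  intro rs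
  induction rs with
  | nil => intro cf; rfl
  | cons riga rs ih =>
    intro cf
    simp only [List.foldl_cons]
    rw [ih, PySem.List.length_pySetD]

lemma pvFlagsGet (himg : Int) (img : List (List Int)) (col : Int) (colonna_flag : List Int)
    (hle : himg.toNat ≤ colonna_flag.length) (j : Nat) (hj : j < colonna_flag.length) :
    (pvBFlags himg img col colonna_flag)[j]? =
      if (j : Int) < max himg 0 then some (pvF img col colonna_flag j) else colonna_flag[j]? := by
  unfold pvBFlags pvF
  have hn0 : (0:Int) ≤ max himg 0 := le_max_right _ _
  have hnt : (max himg 0).toNat = himg.toNat := by omega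
  rw [PySem.List.slice_from _ hn0, PySem.List.pyRange_zero]
  have hlenmap : ((List.range (max himg 0).toNat).map (fun k => (k : Int))).length = himg.toNat := by
    simp [hnt]
  by_cases h : (j : Int) < max himg 0
  · have hjn : j < himg.toNat := by omega
    rw [if_pos h, List.getElem?_append_left (by simp [List.length_map, hnt]; omega)]
    simp [List.getElem?_map, hjn, hnt]
  · have hjn : himg.toNat ≤ j := by omega
    rw [if_neg h, List.getElem?_append_right (by simp [hnt]; omega)]
    simp only [List.length_map, List.length_range, hnt]
    rw [List.getElem?_drop]
    congr 1; omega

-- ===== VERDICT (by name: the statement is the Claim_ definition above) =====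
theorem getmax_bottomdx_spec : Claim_equal_getmax_bottomdx := by
  intro himg img col colonna_flag lmax _ hpre
  unfold Spec_getmax_bottomdx getmax_bottomdx getmax_bottomdx_alt
  obtain ⟨-, hle, -⟩ := hpre
  have hrange : PySem.List.pyRange (himg - 1) (-1) (-1) = (PySem.List.pyRange 0 (max himg 0) 1).reverse := by
    rw [PySem.List.pyRange_neg_one_eq_reverse]
    norm_num
    by_cases h : 0 ≤ himg
    · rw [max_eq_left h]
    · rw [max_eq_right (by omega), PySem.List.pyRange_one_eq_nil (by omega),
          PySem.List.pyRange_one_eq_nil (by omega)]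
  set rs := (PySem.List.pyRange 0 (max himg 0) 1).reverse with hrs
  have hmem : ∀ r ∈ rs, 0 ≤ r ∧ r < (colonna_flag.length : Int) := by
    intro r hm
    rw [hrs, List.mem_reverse, PySem.List.mem_pyRange_one] at hm
    constructor
    · exact hm.1
    · have : r < max himg 0 := hm.2
      omega
  have hF : ∀ r ∈ rs, PySem.List.pyGetD (pvBFlags himg img col colonna_flag) r 0
          = pvF img col colonna_flag r := by
    intro r hm
    have hb := hmem r hm
    rw [hrs, List.mem_reverse, PySem.List.mem_pyRange_one] at hm
    have := pvFlagsGet himg img col colonna_flag hle r.toNat (by omega)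
    rw [PySem.List.pyGetD_of_nonneg _ _ hb.1]
    have hcast : ((r.toNat : Int)) = r := Int.toNat_of_nonneg hb.1
    rw [List.getD_eq_getElem?_getD, this, if_pos (by omega), hcast]
    rfl
  have hnd : rs.Nodup := by
    rw [hrs]; exact List.nodup_reverse.mpr (PySem.List.nodup_pyRange_one 0 (max himg 0))
  rw [hrange]
  rw [pvMain img col lmax colonna_flag (pvBFlags himg img col colonna_flag) rs 0 0 0 colonna_flag rfl hnd hmem (fun _ _ => rfl) hF]
  simp only
  congr 1
  congr 1
  -- flags lists equal
  apply List.ext_getElem?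
  intro j
  by_cases hj : j < colonna_flag.length
  · rw [pvUpdGet img col colonna_flag rs colonna_flag j hj (fun r hm => (hmem r hm).1)]
    rw [pvFlagsGet himg img col colonna_flag hle j hj]
    have : ((j : Int) ∈ rs) ↔ ((j:Int) < max himg 0) := by
      rw [hrs, List.mem_reverse, PySem.List.mem_pyRange_one]
      constructor
      · exact fun h => h.2
      · exact fun h => ⟨by positivity, h⟩
    simp only [this]
  · have h1 : (rs.foldl (fun c r => PySem.List.pySetD c r (pvF img col colonna_flag r)) colonna_flag).length ≤ j := by
      rw [pvLenUpd]; omega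
    have h2 : (pvBFlags himg img col colonna_flag).length ≤ j := by
      unfold pvBFlags
      rw [PySem.List.slice_from _ (le_max_right _ _), PySem.List.pyRange_zero]
      simp only [List.length_append, List.length_map, List.length_range, List.length_drop]
      omega
    rw [List.getElem?_eq_none h1, List.getElem?_eq_none h2]
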